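-- pv_equiv track=rewrite | github.com/ldy9037/python-algorithm | algorithm-lv3/q11.py | solution
-- ===== SOURCE A (Python) =====
-- def solution(n, times):
--     answer = 0
--
--     left = 1
--     right = times[-1] * n
--
--     while left <= right:
--         middle = (left + right) // 2
--         people_count = 0
--
--         for time in times:
--             people_count += middle // time
--
--             if people_count > n: break
--
--         if people_count >= n: right = middle - 1
--         else: left = answer = middle + 1
--
--     return answer
-- ===== SOURCE B (Python) =====
-- def solution(n, times):
--     # The completion times are the multiples k*t of each counter's time t, and the
--     # answer is the n-th smallest such multiple.  Estimate the event rate in fixed-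
--     # point arithmetic to get a provable lower bound 'base' on the answer, count the
--     # events up to 'base', then replay the few remaining events (at most about
--     # 2*len(times)) in order, each counter keeping its next finish time.
--     if n <= 0:
--         return 0
--     K = 1 << 64
--     rate = sum((K + t - 1) // t for t in times)   # K * sum(1/t), rounded up per term
--     base = n * K // rate                          # never exceeds the n-th finish time
--     count = sum(base // t for t in times)         # finish events up to base
--     nxt = [(base // t + 1) * t for t in times]    # each counter's next event after base
--     ans = base
--     for _ in range(n - count):
--         ans = min(nxt)
--         j = nxt.index(ans)
--         nxt[j] = ans + times[j]
--     return ans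
-- ===== Notes on version B (the rewrite author's own statement) =====
-- stated objective: alternative
-- what changed: Replaces A's binary search over the answer with event arithmetic: a fixed-point estimate of the service rate gives a provable lower bound on the n-th finish time, the events up to it are counted in one pass, and only the few remaining finish events are replayed in order (each counter keeping its next finish time).
-- intended difference: On inputs with 1 <= n <= times.count(1) (at least n one-minute counters, so the minimum feasible time is 1) A returns 0 because its binary search never stores an answer when feasibility already holds at the lower bound 1, while B returns the intended minimum time 1. — e.g. on solution(1, [1]): A returns 0, B returns 1
-- outside the precondition, e.g. on solution(5, [-2]): A returns 0, B returns -11; on solution(2, [-2, 3]): A returns 7, B returns -14; on solution(5, [0, 2]): A raises ZeroDivisionError, B raises ZeroDivisionError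
import Mathlib
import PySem

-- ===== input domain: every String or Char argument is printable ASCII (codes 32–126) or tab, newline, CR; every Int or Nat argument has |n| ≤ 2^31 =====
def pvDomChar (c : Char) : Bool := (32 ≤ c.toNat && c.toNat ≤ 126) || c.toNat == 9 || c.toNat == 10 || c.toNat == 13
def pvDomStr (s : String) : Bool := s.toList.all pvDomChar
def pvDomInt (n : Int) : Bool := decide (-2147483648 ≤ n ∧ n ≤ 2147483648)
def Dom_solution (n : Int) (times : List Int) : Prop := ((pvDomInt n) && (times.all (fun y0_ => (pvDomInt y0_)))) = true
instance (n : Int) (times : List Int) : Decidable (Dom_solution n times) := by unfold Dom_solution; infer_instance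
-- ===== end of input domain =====

-- B replaces A's binary search over the answer with event arithmetic: a fixed-point estimate of
-- the service rate bounds the n-th finish time from below, the events up to that bound are counted
-- in one pass, and the few remaining events are replayed in order (alternative algorithm, not
-- claimed faster).

-- ===== PORT A =====
-- the 'for time in times: people_count += middle // time; if people_count > n: break' loop
def solInner (n middle : Int) : List Int → Int → Int
  | [], pc => pc
  | t :: rest, pc =>
    let pc' := pc + PySem.Int.floordiv middle t
    if pc' > n then pc' else solInner n middle rest pc'

-- the 'while left <= right' binary-search loop of A
def solLoop (n : Int) (times : List Int) (left right answer : Int) : Int :=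
  if h : left ≤ right then
    let middle := PySem.Int.floordiv (left + right) 2
    if solInner n middle times 0 ≥ n then solLoop n times left (middle - 1) answer
    else solLoop n times (middle + 1) right (middle + 1)
  else answer
termination_by (right + 1 - left).toNat
decreasing_by
  · have hb := PySem.Int.floordiv_two_mid_bounds h
    omega
  · have hb := PySem.Int.floordiv_two_mid_bounds h
    omega

-- times[-1] raises IndexError on an empty list (pyGet? = none); the port returns 0 there,
-- excluded by Pre_solution
def solution (n : Int) (times : List Int) : Int :=
  match PySem.List.pyGet? times (-1) with
  | none => 0
  | some last => solLoop n times 1 (last * n) 0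

-- ===== PORT B =====
-- B's 'for _ in range(n - count)' loop: ans = min(nxt); j = nxt.index(ans); nxt[j] = ans + times[j]
-- the 'none' branches are unreachable under Pre_solution: nxt is nonempty there (so min? succeeds)
-- and the minimum is a member of nxt (so index? succeeds)
def altLoop (times : List Int) : Nat → List Int → Int → Int
  | 0, _, ans => ans
  | k+1, nxt, ans =>
    match PySem.List.min? nxt (fun x => x) with
    | none => ans
    | some a =>
      match PySem.List.index? nxt a with
      | none => ans
      | some j => altLoop times k (nxt.set j (a + PySem.List.pyGetD times (j : Int) 0)) a

-- fixed-point rate estimate, event count up to it, then the remaining events in order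
def altK : Int := 18446744073709551616
def altRate (times : List Int) : Int :=
  (times.map (fun t => PySem.Int.floordiv (altK + t - 1) t)).sum
def altBase (n : Int) (times : List Int) : Int :=
  PySem.Int.floordiv (n * altK) (altRate times)
def altCount (n : Int) (times : List Int) : Int :=
  (times.map (fun t => PySem.Int.floordiv (altBase n times) t)).sum
def altNxt (n : Int) (times : List Int) : List Int :=
  times.map (fun t => (PySem.Int.floordiv (altBase n times) t + 1) * t)
def solution_alt (n : Int) (times : List Int) : Int :=
  if n ≤ 0 then 0
  else altLoop times (n - altCount n times).toNat (altNxt n times) (altBase n times)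

-- ===== PRECONDITION & SPEC =====
-- Pre_ covers the problem's domain (positive counter times, any n) and the degenerate inputs on
-- which A provably returns 0 without ever dividing (n ≤ 0 with an empty search range, or n < 0
-- with a positive first counter, where every probe breaks immediately).  It excludes the empty
-- list, on which A raises IndexError at times[-1]; lists containing time 0, on which A (and B)
-- raise ZeroDivisionError whenever the loop runs; and the remaining lists with negative counter
-- times, where A's binary search bisects a non-monotone feasibility count and its value is an
-- accident of the bisection path.
def Pre_solution (n : Int) (times : List Int) : Prop :=
  times ≠ [] ∧
  ((∀ t ∈ times, 1 ≤ t) ∨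
   (n ≤ 0 ∧ (times.getLast?.getD 0) * n ≤ 0) ∨
   (n < 0 ∧ 1 ≤ times.head?.getD 0))
instance (n : Int) (times : List Int) : Decidable (Pre_solution n times) := by
  unfold Pre_solution; infer_instance
def pvWitness_solution : Int × List Int := (3, [2, 5])

-- On inputs where at least n of the counters take 1 minute (1 ≤ n ≤ times.count(1), so the minimum
-- feasible time is 1) A returns 0, because its binary search never stores an answer when the
-- feasibility test already holds at the lower bound 1; B returns the intended minimum time 1.
def D_solution (n : Int) (times : List Int) : Prop := 1 ≤ n ∧ n ≤ (times.count 1 : Int)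
instance (n : Int) (times : List Int) : Decidable (D_solution n times) := by
  unfold D_solution; infer_instance

def Spec_solution (n : Int) (times : List Int) (out : Int) : Prop :=
  ¬ D_solution n times → out = solution_alt n times
instance (n : Int) (times : List Int) (out : Int) : Decidable (Spec_solution n times out) := by
  unfold Spec_solution; infer_instance

def pvDiffWitness_solution : Int × List Int := (1, [1])
def pvDiffWitnessOut_solution : Int × Int := (0, 1)


-- ===== CLAIM (what is proved, stated in full; the proofs are below) =====
def Claim_unchanged_solution : Prop := ∀ (n : Int) (times : List Int), Dom_solution n times → Pre_solution n times → Spec_solution n times (solution n times)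
def Claim_changed_solution : Prop := Dom_solution (pvDiffWitness_solution.1) (pvDiffWitness_solution.2) ∧ Pre_solution (pvDiffWitness_solution.1) (pvDiffWitness_solution.2) ∧ D_solution (pvDiffWitness_solution.1) (pvDiffWitness_solution.2) ∧ solution (pvDiffWitness_solution.1) (pvDiffWitness_solution.2) = pvDiffWitnessOut_solution.1 ∧ solution_alt (pvDiffWitness_solution.1) (pvDiffWitness_solution.2) = pvDiffWitnessOut_solution.2 ∧ pvDiffWitnessOut_solution.1 ≠ pvDiffWitnessOut_solution.2
def Claim_exact_solution : Prop := ∀ (n : Int) (times : List Int), Dom_solution n times → Pre_solution n times → D_solution n times → solution n times ≠ solution_alt n times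

-- ===== LEMMAS AND PROOFS =====

-- the feasibility count both programs are about: Fc times t = sum over times of t // time
def Fc (times : List Int) (t : Int) : Int := (times.map (fun x => t / x)).sum

-- 'r is the n-th event time': the count first reaches n at r
def CharAt (times : List Int) (q r : Int) : Prop := Fc times (r - 1) < q ∧ q ≤ Fc times r

theorem Fc_nil (t : Int) : Fc [] t = 0 := rfl

theorem Fc_cons (x t : Int) (xs : List Int) : Fc (x :: xs) t = t / x + Fc xs t := by
  simp [Fc]

theorem Fc_mono {times : List Int} (h : ∀ x ∈ times, 1 ≤ x) {a b : Int} (hab : a ≤ b) :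
    Fc times a ≤ Fc times b := by
  unfold Fc
  exact List.sum_le_sum (fun x hx => Int.ediv_le_ediv (by have := h x hx; omega) hab)

theorem Fc_zero (times : List Int) : Fc times 0 = 0 := by
  unfold Fc
  induction times with
  | nil => rfl
  | cons x xs ih => simp

theorem Fc_nonneg {times : List Int} (h : ∀ x ∈ times, 1 ≤ x) {m : Int} (hm : 0 ≤ m) :
    0 ≤ Fc times m := by
  unfold Fc
  apply List.sum_nonneg
  intro y hy
  obtain ⟨x, hx, rfl⟩ := List.mem_map.mp hy
  exact Int.ediv_nonneg hm (by have := h x hx; omega)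

theorem Fc_single_le {times : List Int} (h : ∀ x ∈ times, 1 ≤ x) {m x : Int}
    (hm : 0 ≤ m) (hx : x ∈ times) : m / x ≤ Fc times m := by
  unfold Fc
  apply List.single_le_sum (l := times.map (fun x => m / x))
  · intro y hy
    obtain ⟨z, hz, rfl⟩ := List.mem_map.mp hy
    exact Int.ediv_nonneg hm (by have := h z hz; omega)
  · exact List.mem_map_of_mem hx

theorem CharAt_unique {times : List Int} (h : ∀ x ∈ times, 1 ≤ x) {q r r' : Int}
    (h1 : CharAt times q r) (h2 : CharAt times q r') : r = r' := by
  obtain ⟨h1a, h1b⟩ := h1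
  obtain ⟨h2a, h2b⟩ := h2
  rcases lt_trichotomy r r' with hc | hc | hc
  · have := Fc_mono h (show r ≤ r' - 1 by omega)
    omega
  · exact hc
  · have := Fc_mono h (show r' ≤ r - 1 by omega)
    omega

-- A's inner loop (with its break) tests exactly 'Fc times middle ≥ n'
theorem solInner_ge_iff {n m : Int} : ∀ (ts : List Int), (∀ x ∈ ts, 1 ≤ x) → 0 ≤ m →
    ∀ acc : Int, (n ≤ solInner n m ts acc ↔ n ≤ acc + Fc ts m) := by
  intro ts
  induction ts with
  | nil => intro _ _ acc; simp [solInner, Fc_nil]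
  | cons t rest ih =>
    intro hts hm acc
    have ht : (1:Int) ≤ t := hts t (by simp)
    have hrest : ∀ x ∈ rest, (1:Int) ≤ x := fun x hx => hts x (by simp [hx])
    have hdv : PySem.Int.floordiv m t = m / t := PySem.Int.floordiv_eq_ediv_of_pos (by omega)
    have hFr : 0 ≤ Fc rest m := Fc_nonneg hrest hm
    rw [Fc_cons]
    show (n ≤ if acc + PySem.Int.floordiv m t > n then acc + PySem.Int.floordiv m t
        else solInner n m rest (acc + PySem.Int.floordiv m t)) ↔ _
    rw [hdv]
    by_cases hbr : acc + m / t > n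
    · rw [if_pos hbr]
      constructor
      · intro _; omega
      · intro _; omega
    · rw [if_neg hbr]
      rw [ih hrest hm (acc + m / t)]
      omega

-- exit case of A's loop: left has bracketed the answer
theorem solLoop_exit {times : List Int} (h : ∀ x ∈ times, 1 ≤ x) {n r left right answer : Int}
    (hchar : CharAt times n r) (hlr : right < left)
    (h2 : Fc times (left - 1) < n) (h3 : n ≤ Fc times (right + 1))
    (h4 : answer = (if left = 1 then 0 else left)) :
    answer = (if r = 1 then 0 else r) := by
  obtain ⟨hca, hcb⟩ := hchar
  have hrl : left ≤ r := by
    by_contra hc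
    have := Fc_mono h (show r ≤ left - 1 by omega)
    omega
  have hrr : r ≤ right + 1 := by
    by_contra hc
    have := Fc_mono h (show right + 1 ≤ r - 1 by omega)
    omega
  have : r = left := by omega
  rw [h4, this]

theorem solLoop_eq {times : List Int} (hpre : ∀ x ∈ times, 1 ≤ x) {n r : Int}
    (hchar : CharAt times n r) :
    ∀ (fuel : Nat) (left right answer : Int),
      (right + 1 - left).toNat ≤ fuel →
      1 ≤ left →
      Fc times (left - 1) < n →
      n ≤ Fc times (right + 1) →
      answer = (if left = 1 then 0 else left) →
      solLoop n times left right answer = (if r = 1 then 0 else r) := by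
  intro fuel
  induction fuel with
  | zero =>
    intro left right answer hf h1 h2 h3 h4
    have hlr : ¬ left ≤ right := by omega
    rw [solLoop.eq_def, dif_neg hlr]
    exact solLoop_exit hpre hchar (by omega) h2 h3 h4
  | succ f ih =>
    intro left right answer hf h1 h2 h3 h4
    rw [solLoop.eq_def]
    by_cases hlr : left ≤ right
    · rw [dif_pos hlr]
      have hb := PySem.Int.floordiv_two_mid_bounds hlr
      set middle := PySem.Int.floordiv (left + right) 2 with hmid
      have hinner := solInner_ge_iff (n := n) (m := middle) times hpre (show (0:Int) ≤ middle by omega) 0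
      by_cases hge : solInner n middle times 0 ≥ n
      · rw [if_pos hge]
        have hFm : n ≤ Fc times middle := by
          have := hinner.mp hge; omega
        apply ih left (middle - 1) answer
        · omega
        · omega
        · exact h2
        · rw [show middle - 1 + 1 = middle by omega]; exact hFm
        · exact h4
      · rw [if_neg hge]
        have hFm : Fc times middle < n := by
          by_contra hc
          exact hge (hinner.mpr (by omega))
        apply ih (middle + 1) right (middle + 1)
        · omega
        · omega
        · rw [show middle + 1 - 1 = middle by omega]; exact hFm
        · exact h3
        · rw [if_neg (by omega)]
    · rw [dif_neg hlr]
      exact solLoop_exit hpre hchar (by omega) h2 h3 h4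

-- A's result, for n ≥ 1, in terms of any r characterised as the n-th event time
theorem solution_eq_of_char {n : Int} {times : List Int} (hne : times ≠ [])
    (hpre : ∀ x ∈ times, 1 ≤ x) (hn : 1 ≤ n) {r : Int} (hchar : CharAt times n r) :
    solution n times = (if r = 1 then 0 else r) := by
  unfold solution
  rw [PySem.List.pyGet?_neg_one, List.getLast?_eq_some_getLast hne]
  have hLmem := List.getLast_mem hne
  have hL1 : (1:Int) ≤ times.getLast hne := hpre _ hLmem
  have hLn0 : (0:Int) ≤ times.getLast hne * n := by positivity
  apply solLoop_eq hpre hchar (times.getLast hne * n + 1 - 1).toNat 1 (times.getLast hne * n) 0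
  · omega
  · omega
  · rw [show (1:Int) - 1 = 0 by omega, Fc_zero]; omega
  · have hdiv : times.getLast hne * n / times.getLast hne = n :=
      Int.mul_ediv_cancel_left n (by omega)
    have hs := Fc_single_le hpre hLn0 hLmem
    have := Fc_mono hpre (show times.getLast hne * n ≤ times.getLast hne * n + 1 by omega)
    omega
  · simp

-- A returns 0 whenever its search range [1, times[-1]*n] is empty
theorem solution_of_empty_range {n : Int} {times : List Int} (hne : times ≠ [])
    (hLn : times.getLast hne * n ≤ 0) : solution n times = 0 := by
  unfold solution
  rw [PySem.List.pyGet?_neg_one, List.getLast?_eq_some_getLast hne]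
  show solLoop n times 1 (times.getLast hne * n) 0 = 0
  rw [solLoop.eq_def, dif_neg (by omega)]

-- with n < 0 and a positive first counter, every probe's inner count breaks at once and is ≥ 0 > n,
-- so the loop only ever moves 'right' and the answer stays 0
theorem solLoop_firstpos {n x : Int} {rest : List Int} (hx : 1 ≤ x) (hn : n < 0) :
    ∀ (fuel : Nat) (right : Int), right.toNat ≤ fuel →
      solLoop n (x :: rest) 1 right 0 = 0 := by
  intro fuel
  induction fuel with
  | zero =>
    intro right hf
    rw [solLoop.eq_def, dif_neg (by omega)]
  | succ f ih =>
    intro right hf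
    rw [solLoop.eq_def]
    by_cases hlr : (1:Int) ≤ right
    · rw [dif_pos hlr]
      have hb := PySem.Int.floordiv_two_mid_bounds hlr
      set middle := PySem.Int.floordiv (1 + right) 2 with hmid
      have hdv : PySem.Int.floordiv middle x = middle / x :=
        PySem.Int.floordiv_eq_ediv_of_pos (by omega)
      have hinner : solInner n middle (x :: rest) 0 = 0 + PySem.Int.floordiv middle x := by
        show (if 0 + PySem.Int.floordiv middle x > n then 0 + PySem.Int.floordiv middle x
            else solInner n middle rest (0 + PySem.Int.floordiv middle x)) = _
        rw [if_pos]
        rw [hdv]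
        have := Int.ediv_nonneg (show (0:Int) ≤ middle by omega) (show (0:Int) ≤ x by omega)
        omega
      have hge : solInner n middle (x :: rest) 0 ≥ n := by
        rw [hinner, hdv]
        have := Int.ediv_nonneg (show (0:Int) ≤ middle by omega) (show (0:Int) ≤ x by omega)
        omega
      rw [if_pos hge]
      exact ih (middle - 1) (by omega)
    · rw [dif_neg hlr]

theorem solution_firstpos {n x : Int} {rest : List Int} (hx : 1 ≤ x) (hn : n < 0) :
    solution n (x :: rest) = 0 := by
  unfold solution
  have hne : x :: rest ≠ [] := by simp
  rw [PySem.List.pyGet?_neg_one, List.getLast?_eq_some_getLast hne]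
  show solLoop n (x :: rest) 1 ((x :: rest).getLast hne * n) 0 = 0
  exact solLoop_firstpos hx hn _ _ (le_refl _)

-- Fc at 1 counts the 1-minute counters
theorem Fc_one {times : List Int} (hpre : ∀ x ∈ times, 1 ≤ x) :
    Fc times 1 = (times.count 1 : Int) := by
  induction times with
  | nil => rfl
  | cons x xs ih =>
    have hx : (1:Int) ≤ x := hpre x (by simp)
    have hxs : ∀ y ∈ xs, (1:Int) ≤ y := fun y hy => hpre y (by simp [hy])
    rw [Fc_cons, ih hxs, List.count_cons]
    by_cases hone : x = 1
    · subst hone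
      simp
      omega
    · rw [Int.ediv_eq_zero_of_lt (by omega) (by omega)]
      simp [hone]

-- ---------- B side: the simulation invariant ----------

-- after p extractions: every pending finish time nxt[i] is the next unfinished multiple of
-- times[i], every already-extracted value (nxt[i] - times[i]) is at most every pending one,
-- and exactly p + len multiples are ≤ their counter's pending one (counted by nxt[i]/times[i])
def SInv (times : List Int) (p : Int) (nxt : List Int) : Prop :=
  times.length = nxt.length ∧
  (∀ q ∈ times.zip nxt, 1 ≤ q.1 ∧ q.1 ∣ q.2 ∧ q.1 ≤ q.2 ∧ ∀ w ∈ nxt, q.2 - q.1 ≤ w) ∧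
  ((times.zip nxt).map (fun q : Int × Int => q.2 / q.1)).sum = p + times.length

theorem ediv_pred {t v : Int} (ht : 1 ≤ t) (hd : t ∣ v) : (v - 1) / t = v / t - 1 := by
  obtain ⟨k, rfl⟩ := hd
  rw [show t * k - 1 = (t - 1) + t * (k - 1) by ring,
    Int.add_mul_ediv_left _ _ (show t ≠ 0 by omega),
    Int.ediv_eq_zero_of_lt (by omega) (by omega),
    Int.mul_ediv_cancel_left _ (show t ≠ 0 by omega)]
  omega

theorem ediv_sub_self {t v : Int} (ht : 1 ≤ t) (hd : t ∣ v) : (v - t) / t = v / t - 1 := by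
  obtain ⟨k, rfl⟩ := hd
  rw [show t * k - t = t * (k - 1) by ring,
    Int.mul_ediv_cancel_left _ (show t ≠ 0 by omega),
    Int.mul_ediv_cancel_left _ (show t ≠ 0 by omega)]

theorem ediv_add_self {t a : Int} (ht : 1 ≤ t) : (a + t) / t = a / t + 1 := by
  rw [show a + t = a + t * 1 by ring, Int.add_mul_ediv_left _ _ (show t ≠ 0 by omega)]

-- Fc as a sum over the zip (lengths equal)
theorem Fc_zip {times nxt : List Int} (hlen : times.length = nxt.length) (m : Int) :
    Fc times m = ((times.zip nxt).map (fun q : Int × Int => m / q.1)).sum := by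
  unfold Fc
  conv_lhs => rw [← List.map_fst_zip (l₂ := nxt) (le_of_eq hlen)]
  rw [List.map_map]
  rfl

-- sum of (g q - 1) over a list
theorem sum_map_sub_one {α : Type} (xs : List α) (g : α → Int) :
    (xs.map (fun q => g q - 1)).sum = (xs.map g).sum - xs.length := by
  have h := PySem.List.sum_map_add_int xs g (fun _ => (-1 : Int))
  have h2 := PySem.List.sum_map_const_int xs (-1 : Int)
  simp only [show (fun q => g q + -1) = (fun q => g q - 1) by funext q; ring] at h
  omega

-- one extraction step of B
theorem step_lemma {times : List Int} (hne : times ≠ []) {p : Int} {nxt : List Int}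
    (hinv : SInv times p nxt) :
    ∃ a j, PySem.List.min? nxt (fun x => x) = some a ∧ PySem.List.index? nxt a = some j ∧
      Fc times (a - 1) ≤ p ∧ p + 1 ≤ Fc times a ∧ 1 ≤ a ∧
      SInv times (p + 1) (nxt.set j (a + PySem.List.pyGetD times (j : Int) 0)) := by
  obtain ⟨hlen, hQ, hS⟩ := hinv
  have hnxt_ne : nxt ≠ [] := by
    intro hc; subst hc; simp at hlen; exact hne hlen
  obtain ⟨a, hmin⟩ : ∃ a, PySem.List.min? nxt (fun x => x) = some a := by
    cases hc : PySem.List.min? nxt (fun x => x) with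
    | none => exact absurd ((PySem.List.min?_eq_none_iff nxt _).mp hc) hnxt_ne
    | some a => exact ⟨a, rfl⟩
  have ha_mem : a ∈ nxt := PySem.List.min?_mem hmin
  have ha_min : ∀ y ∈ nxt, a ≤ y := PySem.List.min?_isMin hmin
  obtain ⟨j, hidx⟩ : ∃ j, PySem.List.index? nxt a = some j := by
    cases hc : PySem.List.index? nxt a with
    | none => exact absurd ((PySem.List.index?_eq_none_iff nxt a).mp hc) (by simp [ha_mem])
    | some j => exact ⟨j, rfl⟩
  obtain ⟨N1, N2, hnxt_eq, hN1len, _⟩ := (PySem.List.index?_eq_some_iff nxt a j).mp hidx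
  have hjn : j < nxt.length := by rw [hnxt_eq]; simp; omega
  have hjt : j < times.length := by omega
  have htimes_eq : times = times.take j ++ times[j] :: times.drop (j + 1) := by
    rw [List.getElem_cons_drop, List.take_append_drop]
  set t := times[j] with ht_def
  have htake_len : (times.take j).length = j := by simp; omega
  have hdrop_len : (times.drop (j + 1)).length = times.length - (j + 1) := by simp
  have hN2len : N2.length = nxt.length - (j + 1) := by
    rw [hnxt_eq]; simp; omega
  have hzip : times.zip nxt = (times.take j).zip N1 ++ (t, a) :: (times.drop (j + 1)).zip N2 := by
    conv_lhs => rw [htimes_eq, hnxt_eq]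
    rw [List.zip_append (by omega), List.zip_cons_cons]
  have hta := hQ (t, a) (by rw [hzip]; simp)
  have hta1 : (1:Int) ≤ t := hta.1
  have htad : t ∣ a := hta.2.1
  have htale : t ≤ a := hta.2.2.1
  have ha1 : (1:Int) ≤ a := by omega
  have hgetD : PySem.List.pyGetD times (j : Int) 0 = t := by
    rw [PySem.List.pyGetD_natCast, List.getD_eq_getElem times 0 hjt]
  have hset : nxt.set j (a + t) = N1 ++ (a + t) :: N2 := by
    rw [hnxt_eq, List.set_append, if_neg (by omega), show j - N1.length = 0 by omega,
      List.set_cons_zero]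
  -- per-pair facts for any pair of the combined zip
  have hmemz : ∀ q ∈ (times.take j).zip N1 ++ (times.drop (j + 1)).zip N2, q ∈ times.zip nxt := by
    intro q hq
    rw [hzip]
    rcases List.mem_append.mp hq with hq | hq
    · exact List.mem_append.mpr (Or.inl hq)
    · exact List.mem_append.mpr (Or.inr (List.mem_cons_of_mem _ hq))
  -- lengths of the two zip halves
  have hZ1len : ((times.take j).zip N1).length = j := by
    rw [List.length_zip]; omega
  have hZ2len : ((times.drop (j + 1)).zip N2).length = times.length - (j + 1) := by
    rw [List.length_zip]; omega
  have hzlen : ((times.zip nxt).length : Int) = times.length := by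
    rw [List.length_zip]; omega
  -- the counted-multiples sum, split at the extracted counter
  have hSsplit : (((times.take j).zip N1).map (fun q : Int × Int => q.2 / q.1)).sum + a / t
      + (((times.drop (j + 1)).zip N2).map (fun q : Int × Int => q.2 / q.1)).sum
      = p + times.length := by
    rw [← hS, hzip]; simp [List.sum_append]; ring
  -- Fc times (a - 1) ≤ p : every counter has already finished all its multiples < a
  have hlo : Fc times (a - 1) ≤ p := by
    rw [Fc_zip hlen (a - 1)]
    have hle : ((times.zip nxt).map (fun q : Int × Int => (a - 1) / q.1)).sum
        ≤ ((times.zip nxt).map (fun q : Int × Int => q.2 / q.1 - 1)).sum := by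
      apply List.sum_le_sum
      intro q hq
      obtain ⟨hq1, hqd, _, _⟩ := hQ q hq
      have hmem2 : q.2 ∈ nxt := (List.of_mem_zip hq).2
      have haq : a ≤ q.2 := ha_min _ hmem2
      have := ediv_pred hq1 hqd
      have hmono := Int.ediv_le_ediv (show (0:Int) < q.1 by omega)
        (show a - 1 ≤ q.2 - 1 by omega)
      omega
    rw [sum_map_sub_one] at hle
    omega
  -- p + 1 ≤ Fc times a : all p extracted multiples are ≤ a, and a itself is one more
  have hhi : p + 1 ≤ Fc times a := by
    rw [Fc_zip hlen a, hzip]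
    simp only [List.map_append, List.sum_append, List.map_cons, List.sum_cons]
    have key : ∀ q ∈ (times.take j).zip N1 ++ (times.drop (j + 1)).zip N2,
        q.2 / q.1 - 1 ≤ a / q.1 := by
      intro q hq
      obtain ⟨hq1, hqd, _, hq4⟩ := hQ q (hmemz q hq)
      have hqa : q.2 - q.1 ≤ a := hq4 a ha_mem
      have := ediv_sub_self hq1 hqd
      have hmono := Int.ediv_le_ediv (show (0:Int) < q.1 by omega) hqa
      omega
    have e1 : (((times.take j).zip N1).map (fun q : Int × Int => q.2 / q.1 - 1)).sum
        ≤ (((times.take j).zip N1).map (fun q : Int × Int => a / q.1)).sum :=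
      List.sum_le_sum (fun q hq => key q (List.mem_append.mpr (Or.inl hq)))
    have e2 : (((times.drop (j + 1)).zip N2).map (fun q : Int × Int => q.2 / q.1 - 1)).sum
        ≤ (((times.drop (j + 1)).zip N2).map (fun q : Int × Int => a / q.1)).sum :=
      List.sum_le_sum (fun q hq => key q (List.mem_append.mpr (Or.inr hq)))
    rw [sum_map_sub_one] at e1 e2
    omega
  refine ⟨a, j, hmin, hidx, hlo, hhi, ha1, ?_⟩
  rw [hgetD, hset]
  have hzip' : times.zip (N1 ++ (a + t) :: N2)
      = (times.take j).zip N1 ++ (t, a + t) :: (times.drop (j + 1)).zip N2 := by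
    conv_lhs => rw [htimes_eq]
    rw [List.zip_append (by omega), List.zip_cons_cons]
  have hmem_new : ∀ w ∈ N1 ++ (a + t) :: N2, w = a + t ∨ w ∈ nxt := by
    intro w hw
    rcases List.mem_append.mp hw with hw | hw
    · exact Or.inr (by rw [hnxt_eq]; exact List.mem_append.mpr (Or.inl hw))
    · rcases List.mem_cons.mp hw with hw | hw
      · exact Or.inl hw
      · exact Or.inr (by rw [hnxt_eq]; exact List.mem_append.mpr (Or.inr (List.mem_cons_of_mem _ hw)))
  refine ⟨by rw [hlen, hnxt_eq]; simp, ?_, ?_⟩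
  · intro q hq
    rw [hzip'] at hq
    rcases List.mem_append.mp hq with hq | hq
    · obtain ⟨hq1, hqd, hqle, hq4⟩ := hQ q (hmemz q (List.mem_append.mpr (Or.inl hq)))
      refine ⟨hq1, hqd, hqle, ?_⟩
      intro w hw
      rcases hmem_new w hw with rfl | hw
      · have := hq4 a ha_mem; omega
      · exact hq4 w hw
    · rcases List.mem_cons.mp hq with rfl | hq
      · refine ⟨hta1, dvd_add htad (dvd_refl t), by omega, ?_⟩
        intro w hw
        rcases hmem_new w hw with rfl | hw
        · omega
        · have := ha_min w hw; omega
      · obtain ⟨hq1, hqd, hqle, hq4⟩ := hQ q (hmemz q (List.mem_append.mpr (Or.inr hq)))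
        refine ⟨hq1, hqd, hqle, ?_⟩
        intro w hw
        rcases hmem_new w hw with rfl | hw
        · have := hq4 a ha_mem; omega
        · exact hq4 w hw
  · rw [hzip']
    simp only [List.map_append, List.sum_append, List.map_cons, List.sum_cons]
    have := ediv_add_self (a := a) hta1
    omega

-- B's loop keeps extracting the next event time
theorem altLoop_char {times : List Int} (hne : times ≠ []) :
    ∀ (k : Nat) (p : Int) (nxt : List Int) (ans : Int), SInv times p nxt →
      Fc times (altLoop times (k+1) nxt ans - 1) < p + k + 1 ∧
      p + k + 1 ≤ Fc times (altLoop times (k+1) nxt ans) := by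
  intro k
  induction k with
  | zero =>
    intro p nxt ans hinv
    obtain ⟨a, j, hmin, hidx, hlo, hhi, ha1, hinv'⟩ := step_lemma hne hinv
    rw [show (0+1 : Nat) = 1 by rfl]
    simp only [altLoop, hmin, hidx]
    constructor <;> omega
  | succ f ih =>
    intro p nxt ans hinv
    obtain ⟨a, j, hmin, hidx, hlo, hhi, ha1, hinv'⟩ := step_lemma hne hinv
    have heq : altLoop times (f+1+1) nxt ans
        = altLoop times (f+1) (nxt.set j (a + PySem.List.pyGetD times (j : Int) 0)) a := by
      simp only [altLoop, hmin, hidx]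
    rw [heq]
    have := ih (p+1) (nxt.set j (a + PySem.List.pyGetD times (j : Int) 0)) a hinv'
    constructor <;> omega

-- per-element step of the rate estimate: (r/t)*K ≤ r*ceil(K/t)
theorem ediv_mul_le_mul_ceil {t r K : Int} (ht : 1 ≤ t) (hr : 0 ≤ r) (hK : 1 ≤ K) :
    (r / t) * K ≤ r * ((K + t - 1) / t) := by
  have hc : K ≤ ((K + t - 1) / t) * t := by
    have h1 := Int.mul_ediv_add_emod (K + t - 1) t
    have h2 := Int.emod_lt_of_pos (K + t - 1) (show (0:Int) < t by omega)
    have h3 := Int.emod_nonneg (K + t - 1) (show t ≠ 0 by omega)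
    have h4 : ((K + t - 1) / t) * t = t * ((K + t - 1) / t) := mul_comm _ _
    omega
  have hq : 0 ≤ r / t := Int.ediv_nonneg hr (by omega)
  have hqt : (r / t) * t ≤ r := by
    have h1 := Int.mul_ediv_add_emod r t
    have h3 := Int.emod_nonneg r (show t ≠ 0 by omega)
    have h4 : (r / t) * t = t * (r / t) := mul_comm _ _
    omega
  have hcpos : 0 ≤ (K + t - 1) / t := Int.ediv_nonneg (by omega) (by omega)
  calc (r / t) * K ≤ (r / t) * (((K + t - 1) / t) * t) := by
        exact mul_le_mul_of_nonneg_left hc hq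
    _ = ((K + t - 1) / t) * ((r / t) * t) := by ring
    _ ≤ ((K + t - 1) / t) * r := mul_le_mul_of_nonneg_left hqt hcpos
    _ = r * ((K + t - 1) / t) := by ring

-- the scaled rate is at least 1 per counter
theorem rate_pos {times : List Int} {K : Int} (hne : times ≠ [])
    (hpre : ∀ x ∈ times, 1 ≤ x) (hK : 1 ≤ K) :
    1 ≤ (times.map (fun t => (K + t - 1) / t)).sum := by
  obtain ⟨x, rest, rfl⟩ := List.exists_cons_of_ne_nil hne
  have hterm : ∀ t ∈ x :: rest, (1:Int) ≤ (K + t - 1) / t := by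
    intro t htm
    have ht := hpre t htm
    have h1 := Int.mul_ediv_add_emod (K + t - 1) t
    have h2 := Int.emod_lt_of_pos (K + t - 1) (show (0:Int) < t by omega)
    have h3 := Int.emod_nonneg (K + t - 1) (show t ≠ 0 by omega)
    nlinarith [Int.ediv_nonneg (show (0:Int) ≤ K + t - 1 by omega) (show (0:Int) ≤ t by omega)]
  calc (1:Int) ≤ (K + x - 1) / x := hterm x (by simp)
    _ ≤ ((x :: rest).map (fun t => (K + t - 1) / t)).sum := by
        apply List.single_le_sum (l := (x :: rest).map (fun t => (K + t - 1) / t))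
        · intro y hy
          obtain ⟨z, hz, rfl⟩ := List.mem_map.mp hy
          have := hterm z hz
          omega
        · exact List.mem_map_of_mem (by simp)

-- the estimate n*K / rate is a lower bound on every r whose event count reaches n
theorem base_le_of_count_ge {times : List Int} {n K r : Int} (hne : times ≠ [])
    (hpre : ∀ x ∈ times, 1 ≤ x) (hK : 1 ≤ K) (hn : 1 ≤ n) (hr : n ≤ Fc times r) :
    (n * K) / (times.map (fun t => (K + t - 1) / t)).sum ≤ r := by
  set rate := (times.map (fun t => (K + t - 1) / t)).sum with hrate
  have hratepos : 1 ≤ rate := rate_pos hne hpre hK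
  have hr0 : 0 ≤ r := by
    by_contra hc
    have := Fc_mono hpre (show r ≤ 0 by omega)
    rw [Fc_zero] at this
    omega
  have hkey : n * K ≤ r * rate := by
    have h1 : Fc times r * K = (times.map (fun t => (r / t) * K)).sum := by
      unfold Fc
      rw [← List.sum_map_mul_right]
    have h2 : r * rate = (times.map (fun t => r * ((K + t - 1) / t))).sum := by
      rw [hrate, ← List.sum_map_mul_left]
    have h3 : (times.map (fun t => (r / t) * K)).sum
        ≤ (times.map (fun t => r * ((K + t - 1) / t))).sum := by
      apply List.sum_le_sum
      intro t htm
      exact ediv_mul_le_mul_ceil (hpre t htm) hr0 hK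
    have h4 : n * K ≤ Fc times r * K := by
      apply mul_le_mul_of_nonneg_right hr (by omega)
    omega
  calc (n * K) / rate ≤ (r * rate) / rate := Int.ediv_le_ediv (by omega) hkey
    _ = r := Int.mul_ediv_cancel r (by omega)

-- the simulation's start state after 'base': each counter at its first event past base
theorem SInv_init {times : List Int} (hpre : ∀ x ∈ times, 1 ≤ x) {base : Int}
    (hbase : 0 ≤ base) :
    SInv times (Fc times base) (times.map (fun t => (base / t + 1) * t)) := by
  have hzip_gen : ∀ (l : List Int) (g : Int → Int),
      l.zip (l.map g) = l.map (fun t => (t, g t)) := by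
    intro l g
    induction l with
    | nil => rfl
    | cons a l ih => simp [ih]
  have hzip : times.zip (times.map (fun t => (base / t + 1) * t))
      = times.map (fun t => (t, (base / t + 1) * t)) := hzip_gen times _
  have hmem_nxt : ∀ w ∈ times.map (fun t => (base / t + 1) * t), base < w := by
    intro w hw
    obtain ⟨t, htm, rfl⟩ := List.mem_map.mp hw
    have ht := hpre t htm
    have h1 := Int.mul_ediv_add_emod base t
    have h3 := Int.emod_nonneg base (show t ≠ 0 by omega)
    have h2 := Int.emod_lt_of_pos base (show (0:Int) < t by omega)
    nlinarith
  refine ⟨by simp, ?_, ?_⟩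
  · intro q hq
    rw [hzip] at hq
    obtain ⟨t, htm, rfl⟩ := List.mem_map.mp hq
    have ht := hpre t htm
    have hq0 : 0 ≤ base / t := Int.ediv_nonneg hbase (by omega)
    refine ⟨ht, dvd_mul_left t (base / t + 1), by nlinarith, ?_⟩
    intro w hw
    have hbw := hmem_nxt w hw
    have hqt : (base / t) * t ≤ base := by
      have h1 := Int.mul_ediv_add_emod base t
      have h3 := Int.emod_nonneg base (show t ≠ 0 by omega)
      have h4 : (base / t) * t = t * (base / t) := mul_comm _ _
      omega
    have : (base / t + 1) * t - t = (base / t) * t := by ring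
    omega
  · rw [hzip, List.map_map]
    have hcongr : ((fun q : Int × Int => q.2 / q.1) ∘ fun t => (t, (base / t + 1) * t))
        = fun t => (base / t + 1) * t / t := rfl
    rw [hcongr]
    have helem : ∀ t ∈ times, (base / t + 1) * t / t = base / t + 1 := by
      intro t htm
      have ht := hpre t htm
      exact Int.mul_ediv_cancel _ (by omega)
    rw [List.map_congr_left helem]
    have := PySem.List.sum_map_add_int times (fun t => base / t) (fun _ => (1:Int))
    rw [this, PySem.List.sum_map_const_int]
    unfold Fc
    omega

-- B's result is the n-th event time, for n ≥ 1
theorem alt_char {n : Int} {times : List Int} (hne : times ≠ [])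
    (hpre : ∀ x ∈ times, 1 ≤ x) (hn : 1 ≤ n) : CharAt times n (solution_alt n times) := by
  have hK : (1:Int) ≤ altK := by unfold altK; norm_num
  have hrate_eq : altRate times = (times.map (fun t => (altK + t - 1) / t)).sum := by
    unfold altRate
    exact congrArg List.sum (List.map_congr_left (fun t htm =>
      PySem.Int.floordiv_eq_ediv_of_pos (by have := hpre t htm; omega)))
  have hratepos : 1 ≤ altRate times := by
    rw [hrate_eq]; exact rate_pos hne hpre hK
  have hbase_eq : altBase n times = (n * altK) / altRate times :=
    PySem.Int.floordiv_eq_ediv_of_pos (by omega)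
  have hbase0 : 0 ≤ altBase n times := by
    rw [hbase_eq]
    exact Int.ediv_nonneg (by positivity) (by omega)
  have hcount_eq : altCount n times = Fc times (altBase n times) := by
    unfold altCount Fc
    exact congrArg List.sum (List.map_congr_left (fun t htm =>
      PySem.Int.floordiv_eq_ediv_of_pos (by have := hpre t htm; omega)))
  have hnxt_eq : altNxt n times = times.map (fun t => (altBase n times / t + 1) * t) := by
    unfold altNxt
    exact List.map_congr_left (fun t htm => by
      rw [PySem.Int.floordiv_eq_ediv_of_pos (show (0:Int) < t by have := hpre t htm; omega)])
  have hlow : ∀ r : Int, n ≤ Fc times r → altBase n times ≤ r := by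
    intro r hr
    rw [hbase_eq, hrate_eq]
    exact base_le_of_count_ge hne hpre hK hn hr
  unfold solution_alt
  rw [if_neg (by omega), hnxt_eq, hcount_eq]
  by_cases hk : n - Fc times (altBase n times) ≤ 0
  · -- the estimate already reached the n-th event: base is exactly the answer
    rw [show (n - Fc times (altBase n times)).toNat = 0 by omega]
    show CharAt times n (altBase n times)
    constructor
    · by_contra hc
      have := hlow (altBase n times - 1) (by omega)
      omega
    · omega
  · obtain ⟨k, hk'⟩ : ∃ k, (n - Fc times (altBase n times)).toNat = k + 1 :=
      ⟨(n - Fc times (altBase n times)).toNat - 1, by omega⟩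
    rw [hk']
    have h := altLoop_char hne k (Fc times (altBase n times))
      (times.map (fun t => (altBase n times / t + 1) * t)) (altBase n times)
      (SInv_init hpre hbase0)
    have hcast : Fc times (altBase n times) + (k : Int) + 1 = n := by omega
    constructor <;> omega

-- ===== VERDICT (by name: the statement is the Claim_ definition above) =====
theorem solution_spec : Claim_unchanged_solution := by
  intro n times _ hpre hD
  obtain ⟨hne, hdisj⟩ := hpre
  by_cases hn : n ≤ 0
  · have hA : solution n times = 0 := by
      rcases hdisj with htimes | ⟨_, hLn⟩ | ⟨hneg, hfirst⟩
      · apply solution_of_empty_range hne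
        have hL1 : (1:Int) ≤ times.getLast hne := htimes _ (List.getLast_mem hne)
        nlinarith
      · apply solution_of_empty_range hne
        rwa [List.getLast?_eq_some_getLast hne, Option.getD_some] at hLn
      · obtain ⟨x, rest, rfl⟩ := List.exists_cons_of_ne_nil hne
        exact solution_firstpos (by simpa using hfirst) hneg
    rw [hA]
    unfold solution_alt
    rw [if_pos hn]
  · have hn1 : 1 ≤ n := by omega
    have htimes : ∀ t ∈ times, (1:Int) ≤ t := by
      rcases hdisj with htimes | ⟨hc, _⟩ | ⟨hc, _⟩
      · exact htimes
      · omega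
      · omega
    have hB := alt_char hne htimes hn1
    rw [solution_eq_of_char hne htimes hn1 hB]
    have hr1 : solution_alt n times ≠ 1 := by
      intro hc
      apply hD
      refine ⟨hn1, ?_⟩
      have := hB.2
      rw [hc] at this
      rw [Fc_one htimes] at this
      exact this
    rw [if_neg hr1]

theorem solution_changed : Claim_changed_solution := by
  unfold Claim_changed_solution
  refine ⟨by decide, by decide, by decide, ?_, by decide, by decide⟩
  show solution 1 [1] = 0
  have hpre : ∀ x ∈ [(1:Int)], (1:Int) ≤ x := by decide
  have hchar : CharAt [1] 1 1 := by
    constructor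
    · rw [show (1:Int) - 1 = 0 by omega, Fc_zero]; omega
    · rw [Fc_one hpre]; decide
  rw [solution_eq_of_char (by decide) hpre (by omega) hchar]
  simp

theorem solution_tight : Claim_exact_solution := by
  intro n times _ hpre hD
  obtain ⟨hne, hdisj⟩ := hpre
  obtain ⟨hn1, hcnt⟩ := hD
  have htimes : ∀ t ∈ times, (1:Int) ≤ t := by
    rcases hdisj with htimes | ⟨hc, _⟩ | ⟨hc, _⟩
    · exact htimes
    · omega
    · omega
  have hchar1 : CharAt times n 1 := by
    constructor
    · rw [show (1:Int) - 1 = 0 by omega, Fc_zero]; omega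
    · rw [Fc_one htimes]; omega
  have hB := alt_char hne htimes hn1
  have halt : solution_alt n times = 1 := CharAt_unique htimes hB hchar1
  rw [solution_eq_of_char hne htimes hn1 hchar1, halt]
  simp
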